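-- pv_equiv track=rewrite | github.com/inochka/icebreakers2 | backend/calc/test.py | generate_distributions
-- ===== SOURCE A (Python) =====
-- from typing import List
--
-- def generate_distributions(icebreakers: List[int], ships: List[int], max_ships_per_icebreaker):
--     def distribute(remaining_ships, current_distribution):
--         distributions.append([list(group) for group in current_distribution])
--         if not remaining_ships:
--             return
--         for i in range(len(icebreakers)):
--             if len(current_distribution[i]) < max_ships_per_icebreaker:
--                 new_distribution = [list(group) for group in current_distribution]
--                 new_distribution[i].append(remaining_ships[0])
--                 distribute(remaining_ships[1:], new_distribution)
--
--     distributions = []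
--     distribute(ships, [[] for _ in icebreakers])
--     return distributions
-- ===== SOURCE B (Python) =====
-- def generate_distributions(icebreakers, ships, max_ships_per_icebreaker):
--     # Iterative pre-order DFS with an explicit work list instead of recursion.
--     results = []
--     stack = [(ships, [[] for _ in icebreakers])]
--     while stack:
--         remaining, current = stack.pop(0)
--         results.append([list(group) for group in current])
--         if remaining:
--             children = []
--             for i in range(len(icebreakers)):
--                 if len(current[i]) < max_ships_per_icebreaker:
--                     extended = [list(group) for group in current]
--                     extended[i].append(remaining[0])
--                     children.append((remaining[1:], extended))
--             stack[0:0] = children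
--     return results
-- ===== Notes on version B (the rewrite author's own statement) =====
-- stated objective: alternative
-- what changed: Replaces A's nested recursive helper appending to a closure-shared list with an iterative pre-order DFS driven by an explicit work list of (remaining_ships, current_distribution) states, splicing children in at the front so emission order is preserved.
import Mathlib
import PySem

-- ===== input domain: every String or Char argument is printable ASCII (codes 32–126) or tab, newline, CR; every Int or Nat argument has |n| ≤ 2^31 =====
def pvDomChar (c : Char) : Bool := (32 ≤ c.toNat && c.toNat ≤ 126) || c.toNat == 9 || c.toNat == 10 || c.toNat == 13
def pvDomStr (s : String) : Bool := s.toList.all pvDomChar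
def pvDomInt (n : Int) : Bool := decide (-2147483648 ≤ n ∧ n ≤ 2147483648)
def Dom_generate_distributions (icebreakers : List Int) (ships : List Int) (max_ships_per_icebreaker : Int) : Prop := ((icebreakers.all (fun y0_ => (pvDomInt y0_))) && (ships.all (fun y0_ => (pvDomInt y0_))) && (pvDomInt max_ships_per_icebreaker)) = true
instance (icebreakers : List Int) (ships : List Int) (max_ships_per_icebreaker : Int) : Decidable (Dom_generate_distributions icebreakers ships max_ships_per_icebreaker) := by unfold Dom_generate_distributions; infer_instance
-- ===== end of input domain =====

-- B replaces A's nested recursive helper by an iterative pre-order DFS over an explicit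
-- work list of (remaining_ships, current_distribution) states (objective: alternative).

-- ===== PORT A =====
-- A's inner recursive `distribute`: emits the current distribution, then for each
-- icebreaker index with room recurses on the rest of the ships (appending results
-- in index order, as the Python appends to the shared `distributions` list).
def pvDistribute (k : Nat) (maxs : Int) : List Int → List (List Int) → List (List (List Int))
  | [], cur => [cur]
  | s :: rem', cur =>
    cur :: (List.range k).flatMap (fun i =>
      if ((cur.getD i []).length : Int) < maxs then
        pvDistribute k maxs rem' (cur.set i ((cur.getD i []) ++ [s]))
      else [])
termination_by rem _ => rem.length
decreasing_by simp

def generate_distributions (icebreakers : List Int) (ships : List Int) (max_ships_per_icebreaker : Int) : List (List (List Int)) :=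
  pvDistribute icebreakers.length max_ships_per_icebreaker ships (icebreakers.map (fun _ => ([] : List Int)))

-- ===== PORT B =====
-- B's while loop: stack with its top at the head (Python pops index 0 and splices the
-- children list back in at index 0, i.e. `children ++ rest`).
def pvLoop (k : Nat) (maxs : Int) : List (List Int × List (List Int)) → List (List (List Int))
  | [] => []
  | (rem, cur) :: rest =>
    match rem with
    | [] => cur :: pvLoop k maxs rest
    | s :: rem' =>
      let children := ((List.range k).filter (fun i => ((cur.getD i []).length : Int) < maxs)).map
        (fun i => (rem', cur.set i ((cur.getD i []) ++ [s])))
      cur :: pvLoop k maxs (children ++ rest)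
termination_by stack => (stack.map (fun st => (k + 1) ^ st.1.length)).sum
decreasing_by
  · simp
  · simp only [List.map_append, List.sum_append, List.map_cons, List.sum_cons, List.map_map]
    have h1 : ((((List.range k).filter (fun i => ((cur.getD i []).length : Int) < maxs)).map
        ((fun st => (k + 1) ^ st.1.length) ∘ (fun i => (rem', cur.set i ((cur.getD i []) ++ [s]))))).sum)
        = (((List.range k).filter (fun i => ((cur.getD i []).length : Int) < maxs)).length) * (k + 1) ^ rem'.length := by
      induction ((List.range k).filter (fun i => ((cur.getD i []).length : Int) < maxs)) with
      | nil => simp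
      | cons a l ih => simp only [List.map_cons, List.sum_cons, List.length_cons, ih, Function.comp]; ring
    rw [h1]
    have h2 : (((List.range k).filter (fun i => ((cur.getD i []).length : Int) < maxs)).length) ≤ k := by
      calc (((List.range k).filter _).length) ≤ (List.range k).length := List.length_filter_le _ _
        _ = k := List.length_range
    have h3 : 0 < (k + 1) ^ rem'.length := by positivity
    have : (((List.range k).filter (fun i => ((cur.getD i []).length : Int) < maxs)).length) * (k + 1) ^ rem'.length
        < (k + 1) ^ (rem'.length + 1) := by
      calc _ ≤ k * (k + 1) ^ rem'.length := Nat.mul_le_mul_right _ h2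
        _ < (k + 1) * (k + 1) ^ rem'.length := by
              exact (Nat.mul_lt_mul_right h3).mpr (Nat.lt_succ_self k)
        _ = (k + 1) ^ (rem'.length + 1) := by ring
    have h4 := Nat.add_lt_add_right this ((rest.map (fun st => (k + 1) ^ st.1.length)).sum)
    simpa using h4

def generate_distributions_alt (icebreakers : List Int) (ships : List Int) (max_ships_per_icebreaker : Int) : List (List (List Int)) :=
  pvLoop icebreakers.length max_ships_per_icebreaker [(ships, icebreakers.map (fun _ => ([] : List Int)))]

-- ===== PRECONDITION & SPEC =====
def Spec_generate_distributions (icebreakers : List Int) (ships : List Int) (max_ships_per_icebreaker : Int) (out : List (List (List Int))) : Prop := out = generate_distributions_alt icebreakers ships max_ships_per_icebreaker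
instance (icebreakers : List Int) (ships : List Int) (max_ships_per_icebreaker : Int) (out : List (List (List Int))) : Decidable (Spec_generate_distributions icebreakers ships max_ships_per_icebreaker out) := by unfold Spec_generate_distributions; infer_instance

-- ===== CLAIM (what is proved, stated in full; the proofs are below) =====
def Claim_equal_generate_distributions : Prop := ∀ (icebreakers : List Int) (ships : List Int) (max_ships_per_icebreaker : Int), Dom_generate_distributions icebreakers ships max_ships_per_icebreaker → Spec_generate_distributions icebreakers ships max_ships_per_icebreaker (generate_distributions icebreakers ships max_ships_per_icebreaker)

-- ===== LEMMAS AND PROOFS =====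

-- flatMap over a filtered list = flatMap with an `if` guard
lemma pvFlatMap_filter {α β : Type} (p : α → Bool) (f : α → List β) (l : List α) :
    (l.filter p).flatMap f = l.flatMap (fun a => if p a then f a else []) := by
  induction l with
  | nil => rfl
  | cons a l ih =>
    by_cases h : p a <;> simp [h, ih]

-- main invariant: the work-list loop emits the recursive DFS output of its top state,
-- then continues with the rest of the stack
lemma pvLoop_cons (k : Nat) (maxs : Int) :
    ∀ (rem : List Int) (cur : List (List Int)) (rest : List (List Int × List (List Int))),
      pvLoop k maxs ((rem, cur) :: rest) = pvDistribute k maxs rem cur ++ pvLoop k maxs rest := by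
  intro rem
  induction rem with
  | nil => intro cur rest; rw [pvLoop, pvDistribute]; simp
  | cons s rem' ih =>
    intro cur rest
    rw [pvLoop, pvDistribute]
    simp only [List.cons_append]
    congr 1
    -- generalize over the list of child states (all with remaining ships rem')
    have inner : ∀ (cs : List (List (List Int))) (rest : List (List Int × List (List Int))),
        pvLoop k maxs (cs.map (fun c => (rem', c)) ++ rest)
          = cs.flatMap (fun c => pvDistribute k maxs rem' c) ++ pvLoop k maxs rest := by
      intro cs
      induction cs with
      | nil => intro rest; simp
      | cons c cs ihc =>
        intro rest
        simp only [List.map_cons, List.cons_append, List.flatMap_cons]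
        rw [ih c (cs.map (fun c => (rem', c)) ++ rest), ihc rest, List.append_assoc]
    have hmap : (((List.range k).filter (fun i => ((cur.getD i []).length : Int) < maxs)).map
          (fun i => (rem', cur.set i ((cur.getD i []) ++ [s]))))
        = (((List.range k).filter (fun i => ((cur.getD i []).length : Int) < maxs)).map
            (fun i => cur.set i ((cur.getD i []) ++ [s]))).map (fun c => (rem', c)) := by
      simp [List.map_map, Function.comp]
    rw [hmap, inner]
    rw [List.flatMap_map, pvFlatMap_filter]
    simp

-- ===== VERDICT (by name: the statement is the Claim_ definition above) =====
theorem generate_distributions_spec : Claim_equal_generate_distributions := by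
  intro icebreakers ships maxs _
  unfold Spec_generate_distributions generate_distributions generate_distributions_alt
  rw [pvLoop_cons]
  simp [pvLoop]
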